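-- pv_equiv track=rewrite | github.com/HRakesh/Sentiment-Analysis-on-Amazon-user-reviews | Code/TextParser.py | prepareSparseMatrix
-- ===== SOURCE A (Python) =====
-- def prepareSparseMatrix(convertedReviews, decisionAttributes):
--     sparseMatrix = []
--     for cr in convertedReviews:
--         newCr = [0] * len(decisionAttributes)
--         for word in cr:
--             if word in decisionAttributes:
--                 index = decisionAttributes.index(word)
--                 newCr[index] += 1
--             else:
--                 pass
--         sparseMatrix.append(newCr)
--     return sparseMatrix
-- ===== SOURCE B (Python) =====
-- def prepareSparseMatrix(convertedReviews, decisionAttributes):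
--     sparseMatrix = []
--     for cr in convertedReviews:
--         counts = {}
--         for word in cr:
--             counts[word] = counts.get(word, 0) + 1
--         sparseMatrix.append([counts.get(a, 0) for a in decisionAttributes])
--     return sparseMatrix
-- ===== Notes on version B (the rewrite author's own statement) =====
-- stated objective: idiomatic
-- what changed: B builds one word-frequency dict per review and projects the vocabulary onto it, instead of scanning the vocabulary twice per word ('in' plus .index); Pre_ excludes vocabularies with duplicate attributes, a corner where A's .index first-match leaves later duplicate columns zero while B counts into every copy - either projection is defensible.
-- outside the precondition, e.g. on prepareSparseMatrix([['a']], ['a', 'a']): A returns [[1, 0]], B returns [[1, 1]]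
import Mathlib
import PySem

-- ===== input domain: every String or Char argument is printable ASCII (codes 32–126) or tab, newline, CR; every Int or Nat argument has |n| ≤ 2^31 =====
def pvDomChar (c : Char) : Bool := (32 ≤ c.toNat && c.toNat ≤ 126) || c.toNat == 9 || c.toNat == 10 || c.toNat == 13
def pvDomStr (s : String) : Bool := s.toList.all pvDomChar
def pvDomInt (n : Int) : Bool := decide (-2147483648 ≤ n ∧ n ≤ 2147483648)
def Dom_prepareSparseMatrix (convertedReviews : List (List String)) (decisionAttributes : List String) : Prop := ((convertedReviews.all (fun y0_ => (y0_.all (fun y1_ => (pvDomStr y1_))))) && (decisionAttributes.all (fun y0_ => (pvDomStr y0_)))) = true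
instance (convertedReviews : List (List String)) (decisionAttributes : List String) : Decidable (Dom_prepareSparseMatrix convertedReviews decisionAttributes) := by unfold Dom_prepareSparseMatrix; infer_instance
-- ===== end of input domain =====

-- B builds one word-frequency dict per review and projects the vocabulary onto it (idiomatic),
-- instead of scanning the vocabulary twice per word; equivalence is claimed for duplicate-free
-- vocabularies (see Pre_).

-- ===== PORT A =====
-- newCr[index] += 1; index comes from .index() on decisionAttributes, so it is always
-- in range of newCr (length = len(decisionAttributes)): List.set/getD is exact here.
def incAt (l : List Int) (i : Nat) : List Int := l.set i (l.getD i 0 + 1)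

def prepareSparseMatrix (convertedReviews : List (List String)) (decisionAttributes : List String) : List (List Int) :=
  convertedReviews.foldl (fun sparseMatrix cr =>
    sparseMatrix ++ [cr.foldl (fun newCr word =>
      if decisionAttributes.contains word then
        match PySem.List.index? decisionAttributes word with
        | some i => incAt newCr i
        | none => newCr
      else newCr) (List.replicate decisionAttributes.length 0)]) []

-- ===== PORT B =====
def prepareSparseMatrix_alt (convertedReviews : List (List String)) (decisionAttributes : List String) : List (List Int) :=
  convertedReviews.foldl (fun sparseMatrix cr =>
    let counts := cr.foldl (fun c w => c.insert w (c.getD w 0 + 1)) PySem.Dict.empty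
    sparseMatrix ++ [decisionAttributes.map (fun a => counts.getD a 0)]) []

-- ===== PRECONDITION & SPEC =====
-- Pre_ excludes vocabularies with a duplicated attribute (A still returns there): A's .index
-- first-match leaves later duplicate columns accidentally zero while B counts into every copy —
-- a corner where either projection is defensible.
def Pre_prepareSparseMatrix (convertedReviews : List (List String)) (decisionAttributes : List String) : Prop := decisionAttributes.Nodup
instance (convertedReviews : List (List String)) (decisionAttributes : List String) : Decidable (Pre_prepareSparseMatrix convertedReviews decisionAttributes) := by unfold Pre_prepareSparseMatrix; infer_instance

def pvWitness_prepareSparseMatrix : List (List String) × List String := ([["a", "b", "a"]], ["a", "b", "c"])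

def Spec_prepareSparseMatrix (convertedReviews : List (List String)) (decisionAttributes : List String) (out : List (List Int)) : Prop := out = prepareSparseMatrix_alt convertedReviews decisionAttributes
instance (convertedReviews : List (List String)) (decisionAttributes : List String) (out : List (List Int)) : Decidable (Spec_prepareSparseMatrix convertedReviews decisionAttributes out) := by unfold Spec_prepareSparseMatrix; infer_instance

-- ===== CLAIM (what is proved, stated in full; the proofs are below) =====
def Claim_equal_prepareSparseMatrix : Prop := ∀ (convertedReviews : List (List String)) (decisionAttributes : List String), Dom_prepareSparseMatrix convertedReviews decisionAttributes → Pre_prepareSparseMatrix convertedReviews decisionAttributes → Spec_prepareSparseMatrix convertedReviews decisionAttributes (prepareSparseMatrix convertedReviews decisionAttributes)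

-- ===== LEMMAS AND PROOFS =====

theorem length_foldlA (das : List String) (cr : List String) (acc : List Int) :
    (cr.foldl (fun newCr word =>
      if das.contains word then
        match PySem.List.index? das word with
        | some i => incAt newCr i
        | none => newCr
      else newCr) acc).length = acc.length := by
  induction cr generalizing acc with
  | nil => rfl
  | cons w cr ih =>
    simp only [List.foldl_cons]
    rw [ih]
    split
    · cases h : PySem.List.index? das w <;> simp [incAt]
    · rfl

theorem getD_incAt (l : List Int) (i j : Nat) (hj : j < l.length) :
    (incAt l j).getD i 0 = l.getD i 0 + if i = j then 1 else 0 := by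
  by_cases h : i = j
  · subst h
    simp [incAt, List.getD, hj]
  · simp [incAt, List.getD, List.getElem?_set_ne (fun hh => h hh.symm), h]

theorem getD_foldlA (das : List String) (cr : List String) (acc : List Int) (i : Nat)
    (hi : i < acc.length) (hlen : acc.length = das.length) :
    (cr.foldl (fun newCr word =>
      if das.contains word then
        match PySem.List.index? das word with
        | some i => incAt newCr i
        | none => newCr
      else newCr) acc).getD i 0
      = acc.getD i 0 + (cr.countP (fun w => PySem.List.index? das w == some i) : Int) := by
  induction cr generalizing acc with
  | nil => simp
  | cons w cr ih =>
    simp only [List.foldl_cons, List.countP_cons]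
    by_cases hmem : das.contains w
    · have hsome : (PySem.List.index? das w).isSome := by
        rw [PySem.List.index?_isSome_iff]; exact List.mem_of_elem_eq_true hmem
      obtain ⟨j, hj⟩ := Option.isSome_iff_exists.mp hsome
      have hjlt : j < das.length := by
        obtain ⟨hk, -, -⟩ := PySem.List.getElem_of_index?_eq_some hj
        exact hk
      have hja : j < acc.length := by omega
      rw [if_pos hmem, hj]
      have hlen' : (incAt acc j).length = acc.length := by simp [incAt]
      rw [ih (incAt acc j) (by rw [hlen']; omega) (by rw [hlen']; omega), getD_incAt acc i j hja]
      by_cases hij : i = j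
      · subst hij; simp; ring
      · have hb : (some j == some i) = false := by simp [Ne.symm hij]
        simp [hij, hb]
    · rw [if_neg hmem]
      have hnone : PySem.List.index? das w = none := by
        rw [PySem.List.index?_eq_none_iff]
        intro h
        exact hmem (List.elem_eq_true_of_mem h)
      rw [ih acc hi hlen, hnone]
      simp

theorem counts_getD (cr : List String) (a : String) :
    (cr.foldl (fun c w => c.insert w (c.getD w 0 + 1)) PySem.Dict.empty).getD a 0
      = (cr.count a : Int) := by
  rw [PySem.Dict.getD_foldl_insert_add_one]
  simp

theorem row_eq (das : List String) (hnd : das.Nodup) (cr : List String) :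
    (cr.foldl (fun newCr word =>
      if das.contains word then
        match PySem.List.index? das word with
        | some i => incAt newCr i
        | none => newCr
      else newCr) (List.replicate das.length 0))
    = das.map (fun a =>
        (cr.foldl (fun c w => c.insert w (c.getD w 0 + 1)) PySem.Dict.empty).getD a 0) := by
  apply List.ext_getElem
  · rw [length_foldlA]; simp
  · intro k h1 h2
    rw [length_foldlA] at h1
    have hk : k < das.length := by simpa using h1
    rw [← List.getD_eq_getElem _ 0 (by rw [length_foldlA]; exact h1),
      getD_foldlA das cr _ k (by simpa using hk) (by simp)]
    have hrep : (List.replicate das.length (0 : Int)).getD k 0 = 0 := by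
      rw [List.getD_eq_getElem _ _ (by simpa using hk)]; simp
    rw [hrep, List.getElem_map, counts_getD]
    have hidx : PySem.List.index? das das[k] = some k := by
      have hs : (PySem.List.index? das das[k]).isSome := by
        rw [PySem.List.index?_isSome_iff]; exact List.getElem_mem hk
      obtain ⟨j, hj⟩ := Option.isSome_iff_exists.mp hs
      obtain ⟨hjlt, heq, -⟩ := PySem.List.getElem_of_index?_eq_some hj
      have : j = k := (List.Nodup.getElem_inj_iff hnd).mp heq
      rw [hj, this]
    have : cr.countP (fun w => PySem.List.index? das w == some k) = cr.count das[k] := by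
      rw [List.count_eq_countP]
      apply List.countP_congr
      intro w _
      by_cases hw : w = das[k]
      · subst hw
        rw [PySem.List.index?_eq_idxOf?] at hidx
        simp [PySem.List.index?_eq_idxOf?, hidx]
      · have hfalse : (PySem.List.index? das w == some k) = false := by
          cases hm : PySem.List.index? das w with
          | none => rfl
          | some m =>
            rw [beq_eq_false_iff_ne]
            intro hmk
            obtain rfl : m = k := Option.some.inj hmk
            obtain ⟨hlt, heq, -⟩ := PySem.List.getElem_of_index?_eq_some hm
            exact hw heq.symm
        rw [hfalse]; simp [hw]
    rw [this]; ring

-- ===== VERDICT (by name: the statement is the Claim_ definition above) =====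
theorem prepareSparseMatrix_spec : Claim_equal_prepareSparseMatrix := by
  unfold Claim_equal_prepareSparseMatrix Spec_prepareSparseMatrix
  intro crs das _ hnd
  unfold prepareSparseMatrix prepareSparseMatrix_alt
  simp only []
  rw [PySem.List.foldl_append_singleton_eq_map, PySem.List.foldl_append_singleton_eq_map]
  simp only [List.nil_append]
  exact List.map_congr_left (fun cr _ => row_eq das hnd cr)
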